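-- pv_equiv track=rewrite | github.com/bcbi-edu/p_eickhoff_SOCCER | src/get_dataset.py | format_commentary
-- ===== SOURCE A (Python) =====
-- def format_commentary(comment):
--     timestamps = [c[0].strip() for c in comment]
--     formatted_comments = {time:[] for time in timestamps}
--     for idx in range(len(comment)):
--         time = comment[idx][0].strip()
--         c = comment[idx][1]
--         formatted_comments[time].extend([c])
--     final_dic = {key:" ".join(value) for key,value in formatted_comments.items()}
--     return final_dic
-- ===== SOURCE B (Python) =====
-- def format_commentary(comment):
--     out = {}
--     for time, c in comment:
--         t = time.strip()
--         if t in out: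
--             out[t] = out[t] + " " + c
--         else:
--             out[t] = c
--     return out
-- ===== Notes on version B (the rewrite author's own statement) =====
-- stated objective: simpler
-- what changed: Single pass maintaining a running joined string per timestamp in one dict, instead of pre-seeding a dict of lists, extending them in a second loop, and joining in a third dict comprehension.
import Mathlib
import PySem

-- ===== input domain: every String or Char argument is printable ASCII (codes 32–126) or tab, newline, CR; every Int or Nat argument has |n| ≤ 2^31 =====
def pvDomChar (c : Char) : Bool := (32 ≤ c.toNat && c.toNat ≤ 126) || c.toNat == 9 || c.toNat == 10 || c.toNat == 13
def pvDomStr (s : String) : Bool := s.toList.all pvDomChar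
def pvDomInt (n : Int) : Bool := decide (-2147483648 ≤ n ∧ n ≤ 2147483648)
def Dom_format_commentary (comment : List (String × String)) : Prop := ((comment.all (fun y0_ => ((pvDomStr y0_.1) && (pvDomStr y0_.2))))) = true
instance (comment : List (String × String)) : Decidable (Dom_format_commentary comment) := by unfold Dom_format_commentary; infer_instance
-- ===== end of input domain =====

-- B replaces A's three passes (seed a dict of lists, extend them in a loop, join in a
-- dict comprehension) by one pass keeping a running joined string per timestamp.

-- ===== PORT A =====
def format_commentary (comment : List (String × String)) : List (String × String) :=
  let timestamps := comment.map (fun c => PySem.Str.strip c.1)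
  let formatted := timestamps.foldl (fun d t => d.insert t ([] : List String)) PySem.Dict.empty
  let formatted2 := comment.foldl
    (fun d c => d.modify (PySem.Str.strip c.1) [] (· ++ [c.2])) formatted
  (formatted2.items.foldl (fun d kv => d.insert kv.1 (PySem.Str.join " " kv.2))
    PySem.Dict.empty).items

-- ===== PORT B =====
def format_commentary_alt (comment : List (String × String)) : List (String × String) :=
  (comment.foldl (fun d p =>
      let t := PySem.Str.strip p.1
      match d.get? t with
      | some s => d.insert t (s ++ " " ++ p.2)
      | none   => d.insert t p.2) PySem.Dict.empty).items

-- ===== PRECONDITION & SPEC =====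
def Spec_format_commentary (comment : List (String × String)) (out : List (String × String)) : Prop := out = format_commentary_alt comment
instance (comment : List (String × String)) (out : List (String × String)) : Decidable (Spec_format_commentary comment out) := by unfold Spec_format_commentary; infer_instance

-- ===== CLAIM (what is proved, stated in full; the proofs are below) =====
def Claim_equal_format_commentary : Prop := ∀ (comment : List (String × String)), Dom_format_commentary comment → Spec_format_commentary comment (format_commentary comment)

-- ===== LEMMAS AND PROOFS =====

-- the stripped key of a pair, and the comments grouped under key k (in input order)
def pvKey (p : String × String) : String := PySem.Str.strip p.1
def pvF (l : List (String × String)) (k : String) : List String :=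
  ((l.map (fun p => (pvKey p, p.2))).filter (fun q => q.1 == k)).map (·.2)
-- how B's stored optional string at a key evolves when the comments in v are folded in
def pvExt (o : Option String) (v : List String) : Option String :=
  match v with
  | [] => o
  | l => match o with
         | none => some (PySem.Str.join " " l)
         | some s => some (s ++ " " ++ PySem.Str.join " " l)

-- the three dictionaries the two programs build
def pvD0 (comment : List (String × String)) : PySem.Dict String (List String) :=
  (comment.map (fun c => PySem.Str.strip c.1)).foldl
    (fun d t => d.insert t ([] : List String)) PySem.Dict.empty
def pvDA (comment : List (String × String)) : PySem.Dict String (List String) :=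
  comment.foldl (fun d c => d.modify (PySem.Str.strip c.1) [] (· ++ [c.2])) (pvD0 comment)
def pvDB (comment : List (String × String)) : PySem.Dict String String :=
  comment.foldl (fun d p =>
      let t := PySem.Str.strip p.1
      match d.get? t with
      | some s => d.insert t (s ++ " " ++ p.2)
      | none   => d.insert t p.2) PySem.Dict.empty

lemma sjoin_singleton (a : String) : PySem.Str.join " " [a] = a := by
  apply String.toList_inj.mp
  simp [PySem.Str.toList_join, PySem.Chars.join_singleton]

lemma sjoin_cons_cons (a b : String) (r : List String) :
    PySem.Str.join " " (a :: b :: r) = a ++ " " ++ PySem.Str.join " " (b :: r) := by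
  apply String.toList_inj.mp
  simp [PySem.Str.toList_join, PySem.Chars.join_cons_cons]

-- B's loop, characterized: the stored value at k is the running join of k's group
lemma B_fold_get (l : List (String × String)) (d : PySem.Dict String String) (k : String) :
    (l.foldl (fun d p =>
      let t := PySem.Str.strip p.1
      match d.get? t with
      | some s => d.insert t (s ++ " " ++ p.2)
      | none   => d.insert t p.2) d).get? k = pvExt (d.get? k) (pvF l k) := by
  induction l generalizing d with
  | nil => rfl
  | cons p rest ih =>
    rw [List.foldl_cons, ih]
    by_cases hk : PySem.Str.strip p.1 = k
    · subst hk
      have hF : pvF (p :: rest) (PySem.Str.strip p.1)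
          = p.2 :: pvF rest (PySem.Str.strip p.1) := by
        simp [pvF, pvKey]
      rw [hF]
      cases hg : d.get? (PySem.Str.strip p.1) with
      | none =>
        simp only [hg, PySem.Dict.get?_insert_self]
        cases hfr : pvF rest (PySem.Str.strip p.1) with
        | nil => simp [pvExt, sjoin_singleton]
        | cons b r => simp [pvExt, sjoin_cons_cons]
      | some s =>
        simp only [hg, PySem.Dict.get?_insert_self]
        cases hfr : pvF rest (PySem.Str.strip p.1) with
        | nil => simp [pvExt, sjoin_singleton]
        | cons b r => simp [pvExt, sjoin_cons_cons, String.append_assoc]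
    · have hF : pvF (p :: rest) k = pvF rest k := by
        simp [pvF, pvKey, hk]
      rw [hF]
      have hne : k ≠ PySem.Str.strip p.1 := fun h => hk h.symm
      cases hg : d.get? (PySem.Str.strip p.1) with
      | none => simp only [hg, PySem.Dict.get?_insert_of_ne _ _ hne]
      | some s => simp only [hg, PySem.Dict.get?_insert_of_ne _ _ hne]

-- A's seeding loop stores only []
lemma getD_seed (ts : List String) (d : PySem.Dict String (List String)) (k : String)
    (h : d.getD k [] = []) :
    (ts.foldl (fun d t => d.insert t ([] : List String)) d).getD k [] = [] := by
  induction ts generalizing d with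
  | nil => exact h
  | cons t rest ih =>
    rw [List.foldl_cons]
    apply ih
    by_cases hk : k = t
    · subst hk; rw [PySem.Dict.getD_insert_self]
    · rw [PySem.Dict.getD_insert_of_ne _ _ _ hk]; exact h

lemma set_update_nil (ts : List String) :
    PySem.Set.update ([] : PySem.Set String) ts = PySem.Set.ofList ts := by
  rw [PySem.Set.update_eq_append_filter]
  simp [PySem.Set.contains]

lemma set_update_self (ts : List String) :
    PySem.Set.update (PySem.Set.ofList ts) ts = PySem.Set.ofList ts := by
  rw [PySem.Set.update_eq_append_filter]
  have h : (PySem.Set.ofList ts).filter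
      (fun y => !(PySem.Set.contains (PySem.Set.ofList ts) y)) = [] := by
    apply List.filter_eq_nil_iff.mpr
    intro y hy
    simp [PySem.Set.contains]
    exact (PySem.Set.mem_ofList ts y).mp hy
  rw [h, List.append_nil]

lemma d0_getD (comment : List (String × String)) (k : String) :
    (pvD0 comment).getD k [] = [] :=
  getD_seed _ _ _ (PySem.Dict.getD_empty k [])

lemma dA_getD (comment : List (String × String)) (k : String) :
    (pvDA comment).getD k [] = pvF comment k := by
  unfold pvDA
  have hmap : comment.foldl
      (fun d c => d.modify (PySem.Str.strip c.1) [] (· ++ [c.2])) (pvD0 comment)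
      = (comment.map (fun p => (pvKey p, p.2))).foldl
          (fun d p => d.modify p.1 [] (· ++ [p.2])) (pvD0 comment) := by
    rw [List.foldl_map]; rfl
  rw [hmap, PySem.Dict.getD_foldl_modify_append, d0_getD]
  simp [pvF]

lemma dA_keys (comment : List (String × String)) :
    (pvDA comment).keys = PySem.Set.ofList (comment.map (fun c => PySem.Str.strip c.1)) := by
  unfold pvDA
  rw [PySem.Dict.keys_foldl_modify_key comment (fun c => PySem.Str.strip c.1)]
  have h0 : (pvD0 comment).keys
      = PySem.Set.ofList (comment.map (fun c => PySem.Str.strip c.1)) := by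
    unfold pvD0
    rw [PySem.Dict.keys_foldl_insert, PySem.Dict.keys_empty, set_update_nil]
  rw [h0, set_update_self]

lemma dB_keys (comment : List (String × String)) :
    (pvDB comment).keys = PySem.Set.ofList (comment.map (fun c => PySem.Str.strip c.1)) := by
  unfold pvDB
  have hbody : (fun (d : PySem.Dict String String) (p : String × String) =>
      let t := PySem.Str.strip p.1
      match d.get? t with
      | some s => d.insert t (s ++ " " ++ p.2)
      | none   => d.insert t p.2)
      = fun d p => d.insert (PySem.Str.strip p.1)
          ((fun (d : PySem.Dict String String) (p : String × String) =>
            match d.get? (PySem.Str.strip p.1) with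
            | some s => s ++ " " ++ p.2
            | none   => p.2) d p) := by
    funext d p
    cases h : d.get? (PySem.Str.strip p.1) <;> simp [h]
  rw [hbody, PySem.Dict.keys_foldl_insert_key comment (fun p => PySem.Str.strip p.1),
      PySem.Dict.keys_empty, set_update_nil]

lemma pvF_ne_nil (comment : List (String × String)) (k : String)
    (hk : k ∈ comment.map (fun c => PySem.Str.strip c.1)) : pvF comment k ≠ [] := by
  obtain ⟨c, hc, hck⟩ := List.mem_map.mp hk
  have hmem : (c.2 : String) ∈ pvF comment k := by
    apply List.mem_map.mpr
    refine ⟨(pvKey c, c.2), List.mem_filter.mpr ⟨List.mem_map.mpr ⟨c, hc, rfl⟩, ?_⟩, rfl⟩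
    simp [pvKey, hck]
  exact List.ne_nil_of_mem hmem

lemma dB_getD (comment : List (String × String)) (k : String)
    (hk : k ∈ comment.map (fun c => PySem.Str.strip c.1)) :
    (pvDB comment).getD k "" = PySem.Str.join " " (pvF comment k) := by
  have hget : (pvDB comment).get? k = pvExt (PySem.Dict.empty.get? k) (pvF comment k) :=
    B_fold_get comment PySem.Dict.empty k
  rw [PySem.Dict.get?_empty] at hget
  cases hfr : pvF comment k with
  | nil => exact absurd hfr (pvF_ne_nil comment k hk)
  | cons b r =>
    rw [hfr] at hget
    exact PySem.Dict.getD_of_get?_eq_some _ _ hget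

theorem main_eq (comment : List (String × String)) :
    format_commentary comment = format_commentary_alt comment := by
  have hnA : (pvDA comment).keys.Nodup := by
    rw [dA_keys]; exact PySem.Set.nodup_ofList _
  have hnB : (pvDB comment).keys.Nodup := by
    rw [dB_keys]; exact PySem.Set.nodup_ofList _
  have h1 : format_commentary comment
      = ((pvDA comment).items.foldl
          (fun d kv => d.insert kv.1 (PySem.Str.join " " kv.2)) PySem.Dict.empty).items := rfl
  have h2 : format_commentary_alt comment = (pvDB comment).items := rfl
  have hnd : (List.map (fun kv : String × List String => kv.1) (pvDA comment).items).Nodup := hnA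
  have hAfresh : ((pvDA comment).items.foldl
      (fun d kv => d.insert kv.1 (PySem.Str.join " " kv.2)) PySem.Dict.empty).items
      = (pvDA comment).items.map (fun kv => (kv.1, PySem.Str.join " " kv.2)) := by
    rw [PySem.Dict.items_foldl_insert_fresh (pvDA comment).items
      (fun kv => kv.1) (fun kv => PySem.Str.join " " kv.2) PySem.Dict.empty
      (fun a _ => PySem.Dict.contains_empty a.1) hnd]
    rfl
  rw [h1, h2, hAfresh,
      PySem.Dict.items_eq_map_keys (pvDA comment) hnA ([] : List String),
      PySem.Dict.items_eq_map_keys (pvDB comment) hnB "",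
      List.map_map, dA_keys, dB_keys]
  apply List.map_congr_left
  intro k hk
  have hk' : k ∈ comment.map (fun c => PySem.Str.strip c.1) :=
    (PySem.Set.mem_ofList _ k).mp hk
  simp only [Function.comp]
  rw [dA_getD, dB_getD comment k hk']

-- ===== VERDICT (by name: the statement is the Claim_ definition above) =====
theorem format_commentary_spec : Claim_equal_format_commentary := by
  intro comment _
  show _ = _
  exact main_eq comment
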